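-- pv_equiv track=rewrite | github.com/thein3000/code_problems | app_analytics/analytics_engine/core.py | identify_order_status
-- ===== SOURCE A (Python) =====
-- def identify_order_status(data):
--     """Given a list of order lines from a common order, returns the overall status."""
--     PENDING = "PENDING"
--     SHIPPED = "SHIPPED"
--     CANCELLED = "CANCELLED"
--
--     status_counts = {
--         SHIPPED: 0,
--         PENDING: 0,
--         CANCELLED: 0
--     }
--     for order in data:
--         if order["status"] == SHIPPED:
--             status_counts[SHIPPED] += 1
--         elif order["status"] == PENDING:
--             status_counts[PENDING] += 1
--         else:
--             status_counts[CANCELLED] += 1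
--
--     if status_counts[PENDING] > 0:
--         return PENDING
--     elif status_counts[CANCELLED] > 0 and status_counts[SHIPPED] == 0:
--         return CANCELLED
--     return SHIPPED
-- ===== SOURCE B (Python) =====
-- def identify_order_status(data):
--     """Given a list of order lines from a common order, returns the overall status."""
--     PENDING = "PENDING"
--     SHIPPED = "SHIPPED"
--     if any(o["status"] == PENDING for o in data):
--         return PENDING
--     if any(o["status"] not in (SHIPPED, PENDING) for o in data) and not any(o["status"] == SHIPPED for o in data):
--         return "CANCELLED"
--     return SHIPPED
-- ===== Notes on version B (the rewrite author's own statement) =====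
-- stated objective: idiomatic
-- what changed: Replaced the accumulating count-dict pass and count comparisons with short-circuiting any() presence checks per status class.
-- outside the precondition, e.g. on identify_order_status([{}]): A raises KeyError, B raises KeyError
import Mathlib
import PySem

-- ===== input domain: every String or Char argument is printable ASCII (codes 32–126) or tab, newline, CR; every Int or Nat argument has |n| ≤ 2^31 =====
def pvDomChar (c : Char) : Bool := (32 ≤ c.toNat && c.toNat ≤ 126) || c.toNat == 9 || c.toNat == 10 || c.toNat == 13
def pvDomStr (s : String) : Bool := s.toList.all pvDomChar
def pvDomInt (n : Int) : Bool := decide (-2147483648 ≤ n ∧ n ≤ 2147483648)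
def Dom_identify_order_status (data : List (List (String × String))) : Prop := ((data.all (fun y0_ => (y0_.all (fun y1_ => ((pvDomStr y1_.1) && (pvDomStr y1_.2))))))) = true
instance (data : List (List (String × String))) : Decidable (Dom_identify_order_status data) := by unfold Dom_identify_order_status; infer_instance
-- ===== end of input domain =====

-- B replaces A's counting-dict pass and count comparisons with short-circuiting any() presence checks (idiomatic; same return value).

-- ===== PORT A =====
-- A-side helpers: the initial counts dict and the loop body of A's for-loop.
def pvInitA : PySem.Dict String Int :=
  ((PySem.Dict.empty.insert "SHIPPED" 0).insert "PENDING" 0).insert "CANCELLED" 0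

def pvStepA (d : PySem.Dict String Int) (o : List (String × String)) : PySem.Dict String Int :=
  if ((PySem.Dict.mk o).get? "status").getD "" == "SHIPPED" then d.modify "SHIPPED" 0 (· + 1)
  else if ((PySem.Dict.mk o).get? "status").getD "" == "PENDING" then d.modify "PENDING" 0 (· + 1)
  else d.modify "CANCELLED" 0 (· + 1)

def identify_order_status (data : List (List (String × String))) : String :=
  let counts := data.foldl pvStepA pvInitA
  if counts.getD "PENDING" 0 > 0 then "PENDING"
  else if counts.getD "CANCELLED" 0 > 0 ∧ counts.getD "SHIPPED" 0 = 0 then "CANCELLED"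
  else "SHIPPED"

-- ===== PORT B =====
def identify_order_status_alt (data : List (List (String × String))) : String :=
  if data.any (fun o => ((PySem.Dict.mk o).get? "status").getD "" == "PENDING") then "PENDING"
  else if (data.any (fun o =>
            !(((PySem.Dict.mk o).get? "status").getD "" == "SHIPPED")
            && !(((PySem.Dict.mk o).get? "status").getD "" == "PENDING")))
          && !(data.any (fun o => ((PySem.Dict.mk o).get? "status").getD "" == "SHIPPED"))
       then "CANCELLED"
  else "SHIPPED"

-- ===== PRECONDITION & SPEC =====
-- Pre_ excludes order lines lacking a "status" key, on which the Python A raises KeyError.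
def Pre_identify_order_status (data : List (List (String × String))) : Prop :=
  ∀ o ∈ data, "status" ∈ o.map Prod.fst
instance (data : List (List (String × String))) : Decidable (Pre_identify_order_status data) := by unfold Pre_identify_order_status; infer_instance
def pvWitness_identify_order_status : (List (List (String × String))) :=
  [[("status", "SHIPPED")], [("status", "PENDING")]]
def Spec_identify_order_status (data : List (List (String × String))) (out : String) : Prop := out = identify_order_status_alt data
instance (data : List (List (String × String))) (out : String) : Decidable (Spec_identify_order_status data out) := by unfold Spec_identify_order_status; infer_instance

-- ===== CLAIM (what is proved, stated in full; the proofs are below) =====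
def Claim_equal_identify_order_status : Prop := ∀ (data : List (List (String × String))), Dom_identify_order_status data → Pre_identify_order_status data → Spec_identify_order_status data (identify_order_status data)

-- ===== LEMMAS AND PROOFS =====

def pvStatus (o : List (String × String)) : String := ((PySem.Dict.mk o).get? "status").getD ""

lemma pvFold_getD (data : List (List (String × String))) (d : PySem.Dict String Int)
    (k : String) (hk : k = "SHIPPED" ∨ k = "PENDING" ∨ k = "CANCELLED") :
    (data.foldl pvStepA d).getD k 0 =
      d.getD k 0 + (data.countP (fun o =>
        (if pvStatus o == "SHIPPED" then "SHIPPED"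
         else if pvStatus o == "PENDING" then "PENDING" else "CANCELLED") == k) : Int) := by
  induction data generalizing d with
  | nil => simp [List.countP]
  | cons o t ih =>
    rw [List.foldl_cons, List.countP_cons, ih]
    show (pvStepA d o).getD k 0 + _ = _
    unfold pvStepA
    rcases hk with rfl | rfl | rfl <;>
    by_cases h1 : pvStatus o == "SHIPPED" <;>
    by_cases h2 : pvStatus o == "PENDING" <;>
    simp [pvStatus] at h1 h2 <;>
    simp [h1, h2, pvStatus, PySem.Dict.getD_modify] <;> omega

lemma pvCount_pos_iff (data : List (List (String × String))) (p : List (String × String) → Bool) :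
    ((data.countP p : Int) > 0) ↔ data.any p := by
  constructor
  · intro h
    have hn : 0 < data.countP p := by exact_mod_cast h
    rcases List.countP_pos_iff.mp hn with ⟨o, ho, hp⟩
    exact List.any_eq_true.mpr ⟨o, ho, hp⟩
  · intro h
    rcases List.any_eq_true.mp h with ⟨o, ho, hp⟩
    have hn : 0 < data.countP p := List.countP_pos_iff.mpr ⟨o, ho, hp⟩
    exact_mod_cast hn

lemma pvCountA_getD (data : List (List (String × String))) (k : String)
    (hk : k = "SHIPPED" ∨ k = "PENDING" ∨ k = "CANCELLED") :
    (data.foldl pvStepA pvInitA).getD k 0 =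
      (data.countP (fun o =>
        (if pvStatus o == "SHIPPED" then "SHIPPED"
         else if pvStatus o == "PENDING" then "PENDING" else "CANCELLED") == k) : Int) := by
  rw [pvFold_getD data pvInitA k hk]
  rcases hk with rfl | rfl | rfl <;> simp [pvInitA, PySem.Dict.getD_insert]

lemma pvCount_zero_iff (data : List (List (String × String))) (p : List (String × String) → Bool) :
    ((data.countP p : Int) = 0) ↔ data.any p = false := by
  have h1 := pvCount_pos_iff data p
  have h2 : (0:Int) ≤ data.countP p := Int.natCast_nonneg _
  rcases Bool.eq_false_or_eq_true (data.any p) with hb | hb <;> simp [hb] at h1 ⊢ <;> omega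

-- ===== VERDICT (by name: the statement is the Claim_ definition above) =====
theorem identify_order_status_spec : Claim_equal_identify_order_status := by
  intro data _ _
  show identify_order_status data = identify_order_status_alt data
  unfold identify_order_status identify_order_status_alt
  simp only []
  rw [pvCountA_getD data "PENDING" (Or.inr (Or.inl rfl)),
      pvCountA_getD data "CANCELLED" (Or.inr (Or.inr rfl)),
      pvCountA_getD data "SHIPPED" (Or.inl rfl)]
  have hPred : ∀ (k : String) (q : List (String × String) → Bool),
      (∀ o : List (String × String),
        ((if pvStatus o == "SHIPPED" then "SHIPPED"
          else if pvStatus o == "PENDING" then "PENDING" else "CANCELLED") == k) = q o) →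
      data.countP (fun o =>
        (if pvStatus o == "SHIPPED" then "SHIPPED"
         else if pvStatus o == "PENDING" then "PENDING" else "CANCELLED") == k) = data.countP q := by
    intro k q hq
    exact List.countP_congr (fun o _ => by rw [hq o])
  rw [hPred "PENDING" (fun o => ((PySem.Dict.mk o).get? "status").getD "" == "PENDING")
        (fun o => by
          by_cases h1 : pvStatus o = "SHIPPED" <;> by_cases h2 : pvStatus o = "PENDING" <;>
            simp_all [pvStatus]),
      hPred "CANCELLED" (fun o =>
          !(((PySem.Dict.mk o).get? "status").getD "" == "SHIPPED")
          && !(((PySem.Dict.mk o).get? "status").getD "" == "PENDING"))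
        (fun o => by
          by_cases h1 : pvStatus o = "SHIPPED" <;> by_cases h2 : pvStatus o = "PENDING" <;>
            simp_all [pvStatus]),
      hPred "SHIPPED" (fun o => ((PySem.Dict.mk o).get? "status").getD "" == "SHIPPED")
        (fun o => by
          by_cases h1 : pvStatus o = "SHIPPED" <;> by_cases h2 : pvStatus o = "PENDING" <;>
            simp_all [pvStatus])]
  simp only [pvCount_pos_iff data, pvCount_zero_iff data]
  cases hpB : data.any (fun o => ((PySem.Dict.mk o).get? "status").getD "" == "PENDING") <;>
  cases hcB : data.any (fun o =>
      !(((PySem.Dict.mk o).get? "status").getD "" == "SHIPPED")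
      && !(((PySem.Dict.mk o).get? "status").getD "" == "PENDING")) <;>
  cases hsB : data.any (fun o => ((PySem.Dict.mk o).get? "status").getD "" == "SHIPPED") <;>
  simp_all
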